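-- pv_equiv track=rewrite | github.com/akshh229/Twin-Titans_Lazarus | backend/app/services/name_decoder.py | decode_patient_name
-- ===== SOURCE A (Python) =====
-- FIRST_NAMES = {
--     "JOHN",
--     "JANE",
--     "ROBERT",
--     "MARIA",
--     "DAVID",
--     "SARAH",
--     "MICHAEL",
--     "EMILY",
--     "JAMES",
--     "LINDA",
--     "WILLIAM",
--     "PATRICIA",
--     "RICHARD",
--     "BARBARA",
--     "JOSEPH",
--     "ELIZABETH",
--     "THOMAS",
--     "SUSAN",
--     "CHARLES",
--     "JESSICA",
-- }
--
-- LAST_NAMES = {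
--     "SMITH",
--     "JOHNSON",
--     "WILLIAMS",
--     "BROWN",
--     "JONES",
--     "GARCIA",
--     "MILLER",
--     "DAVIS",
--     "RODRIGUEZ",
--     "MARTINEZ",
--     "HERNANDEZ",
--     "LOPEZ",
--     "GONZALEZ",
--     "WILSON",
--     "ANDERSON",
--     "THOMAS",
--     "TAYLOR",
--     "MOORE",
--     "JACKSON",
--     "MARTIN",
-- }
--
-- def _titlecase_name(value: str) -> str:
--     return " ".join(part.title() for part in value.split())
--
-- def decode_patient_name(name_cipher: str | None) -> str:
--     """Decode an uppercase spaceless name cipher into `First Last`.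
--
--     Seed data is generated from curated first/last name lists, so we first try an
--     exact list-based split before falling back to a generic heuristic.
--     """
--
--     if not name_cipher:
--         return "Unknown"
--
--     name = "".join(character for character in name_cipher.upper() if character.isalpha())
--     if not name:
--         return "Unknown"
--
--     for first_name in sorted(FIRST_NAMES, key=len, reverse=True):
--         if not name.startswith(first_name):
--             continue
--
--         last_name = name[len(first_name) :]
--         if last_name in LAST_NAMES:
--             return f"{first_name.title()} {last_name.title()}"
--
--     best_split: tuple[str, str] | None = None
--     best_score: tuple[int, int] | None = None
--
--     for split_index in range(2, len(name) - 1):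
--         first_name = name[:split_index]
--         last_name = name[split_index:]
--         if not (first_name.isalpha() and last_name.isalpha()):
--             continue
--         if len(first_name) < 2 or len(last_name) < 2:
--             continue
--
--         score = (abs(len(first_name) - len(last_name)), -min(len(first_name), len(last_name)))
--         if best_score is None or score < best_score:
--             best_split = (first_name, last_name)
--             best_score = score
--
--     if best_split is not None:
--         return f"{best_split[0].title()} {best_split[1].title()}"
--
--     return _titlecase_name(name_cipher)
-- ===== SOURCE B (Python) =====
-- FIRST_NAMES = {
--     "JOHN", "JANE", "ROBERT", "MARIA", "DAVID", "SARAH", "MICHAEL", "EMILY",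
--     "JAMES", "LINDA", "WILLIAM", "PATRICIA", "RICHARD", "BARBARA", "JOSEPH",
--     "ELIZABETH", "THOMAS", "SUSAN", "CHARLES", "JESSICA",
-- }
--
-- LAST_NAMES = {
--     "SMITH", "JOHNSON", "WILLIAMS", "BROWN", "JONES", "GARCIA", "MILLER",
--     "DAVIS", "RODRIGUEZ", "MARTINEZ", "HERNANDEZ", "LOPEZ", "GONZALEZ",
--     "WILSON", "ANDERSON", "THOMAS", "TAYLOR", "MOORE", "JACKSON", "MARTIN",
-- }
--
-- def decode_patient_name(name_cipher):
--     if not name_cipher: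
--         return "Unknown"
--     name = "".join(c for c in name_cipher.upper() if c.isalpha())
--     if not name:
--         return "Unknown"
--     # exact split: longest first-name prefix whose remainder is a known last name
--     # (first names are 4..9 letters long, so only those prefix lengths can match)
--     for k in range(min(len(name), 9), 3, -1):
--         first, last = name[:k], name[k:]
--         if first in FIRST_NAMES and last in LAST_NAMES:
--             return first.title() + " " + last.title()
--     # heuristic: the most balanced split is deterministically the middle index
--     if len(name) >= 4:
--         m = len(name) // 2
--         return name[:m].title() + " " + name[m:].title()
--     return " ".join(p.title() for p in name_cipher.split())
-- ===== Notes on version B (the rewrite author's own statement) =====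
-- stated objective: faster
-- what changed: B replaces A's scan over the 20 sorted first names (slicing a suffix per candidate) with one descending scan over prefix lengths with set lookups, and replaces A's argmin loop over all split indices (with redundant isalpha checks and O(n) slices per index) with the closed-form middle split at len(name)//2.
import Mathlib
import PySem

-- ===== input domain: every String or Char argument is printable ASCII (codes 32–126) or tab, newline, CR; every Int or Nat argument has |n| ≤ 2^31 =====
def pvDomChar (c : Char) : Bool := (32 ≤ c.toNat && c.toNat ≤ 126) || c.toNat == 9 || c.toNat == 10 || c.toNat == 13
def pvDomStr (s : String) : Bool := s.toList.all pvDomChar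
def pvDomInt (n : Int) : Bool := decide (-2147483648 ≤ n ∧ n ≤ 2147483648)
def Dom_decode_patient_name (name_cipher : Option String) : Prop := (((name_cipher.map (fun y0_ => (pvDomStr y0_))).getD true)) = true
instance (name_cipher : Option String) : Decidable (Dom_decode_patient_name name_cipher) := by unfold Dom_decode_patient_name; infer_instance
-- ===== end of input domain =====

-- B replaces A's 20-name prefix scan by a single descending-length scan and replaces A's
-- argmin loop over all split points by the closed-form middle split (objective: faster).

-- ===== PORT A =====
-- the module-level name sets (Python set literals), as sets of char lists
def pvFIRSTl : PySem.Set (List Char) := PySem.Set.ofList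
  ["JOHN".toList, "JANE".toList, "ROBERT".toList, "MARIA".toList, "DAVID".toList,
   "SARAH".toList, "MICHAEL".toList, "EMILY".toList, "JAMES".toList, "LINDA".toList,
   "WILLIAM".toList, "PATRICIA".toList, "RICHARD".toList, "BARBARA".toList, "JOSEPH".toList,
   "ELIZABETH".toList, "THOMAS".toList, "SUSAN".toList, "CHARLES".toList, "JESSICA".toList]
def pvLASTl : PySem.Set (List Char) := PySem.Set.ofList
  ["SMITH".toList, "JOHNSON".toList, "WILLIAMS".toList, "BROWN".toList, "JONES".toList,
   "GARCIA".toList, "MILLER".toList, "DAVIS".toList, "RODRIGUEZ".toList, "MARTINEZ".toList,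
   "HERNANDEZ".toList, "LOPEZ".toList, "GONZALEZ".toList, "WILSON".toList, "ANDERSON".toList,
   "THOMAS".toList, "TAYLOR".toList, "MOORE".toList, "JACKSON".toList, "MARTIN".toList]

-- str.title, hand-ported char by char (exact on ASCII, where the cased characters are exactly the letters)
def pvTitleGo : List Char → Bool → List Char
  | [], _ => []
  | c :: rest, prevCased =>
    if PySem.Chars.isalpha c then
      (if prevCased then PySem.Chars.lowerChar c else PySem.Chars.upperChar c) :: pvTitleGo rest true
    else c :: pvTitleGo rest false
def pvTitle (cs : List Char) : List Char := pvTitleGo cs false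

-- _titlecase_name: " ".join(part.title() for part in value.split())
def pvTitlecaseName (s : String) : String :=
  String.ofList (PySem.Chars.join [' '] ((PySem.Chars.split₀ s.toList).map pvTitle))

-- sorted(FIRST_NAMES, key=len, reverse=True); the tie order among equal-length names is Python's
-- hash order, which provably cannot affect the result (two same-length prefixes of one string coincide)
def pvSortedFirst : List (List Char) := PySem.List.sorted pvFIRSTl (fun c => (c.length : Int)) true

-- the 'for first_name in sorted(...)' loop with its early return
def pvALoop (name : List Char) : List (List Char) → Option String
  | [] => none
  | fn :: rest =>
    if !(PySem.Chars.startswith name fn) then pvALoop name rest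
    else
      let lastN := PySem.List.slice name (some (fn.length : Int)) none
      if PySem.Set.contains pvLASTl lastN then
        some (String.ofList (pvTitle fn ++ ' ' :: pvTitle lastN))
      else pvALoop name rest

-- one iteration of the best-split loop; state = (best_split, best_score)
def pvAStep (name : List Char) (st : Option (List Char × List Char) × Option (Int × Int)) (i : Int) :
    Option (List Char × List Char) × Option (Int × Int) :=
  let first := PySem.List.slice name none (some i)
  let lastN := PySem.List.slice name (some i) none
  if !(PySem.Chars.strIsalpha first && PySem.Chars.strIsalpha lastN) then st
  else if first.length < 2 ∨ lastN.length < 2 then st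
  else
    let score : Int × Int :=
      (|(first.length : Int) - (lastN.length : Int)|, -(min (first.length : Int) (lastN.length : Int)))
    match st.2 with
    | none => (some (first, lastN), some score)
    | some best =>
      if score.1 < best.1 ∨ (score.1 = best.1 ∧ score.2 < best.2) then (some (first, lastN), some score)
      else st

def pvAFold (name : List Char) : Option (List Char × List Char) × Option (Int × Int) :=
  (PySem.List.pyRange 2 ((name.length : Int) - 1) 1).foldl (pvAStep name) (none, none)

-- everything of A after 'name' has been computed (and found nonempty-checked)
def pvABody (s : String) (name : List Char) : String :=
  if name = [] then "Unknown"
  else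
    match pvALoop name pvSortedFirst with
    | some r => r
    | none =>
      match (pvAFold name).1 with
      | some (f, l) => String.ofList (pvTitle f ++ ' ' :: pvTitle l)
      | none => pvTitlecaseName s

def decode_patient_name (name_cipher : Option String) : String :=
  match name_cipher with
  | none => "Unknown"
  | some s =>
    if s = "" then "Unknown"
    else pvABody s ((PySem.Chars.upper s.toList).filter PySem.Chars.isalpha)

-- ===== PORT B =====
-- 'for k in range(min(len(name), 9), 3, -1)': structural countdown on k, stopping below 4;
-- name[:k]/name[k:] are take/drop (k ≥ 0)
def pvBExact (name : List Char) : Nat → Option String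
  | k + 4 =>
    let first := name.take (k + 4)
    let lastN := name.drop (k + 4)
    if PySem.Set.contains pvFIRSTl first && PySem.Set.contains pvLASTl lastN then
      some (String.ofList (pvTitle first ++ ' ' :: pvTitle lastN))
    else pvBExact name (k + 3)
  | _ => none

def pvBBody (s : String) (name : List Char) : String :=
  if name = [] then "Unknown"
  else
    match pvBExact name (min name.length 9) with
    | some r => r
    | none =>
      if 4 ≤ name.length then
        String.ofList (pvTitle (name.take (name.length / 2)) ++ ' ' :: pvTitle (name.drop (name.length / 2)))
      else pvTitlecaseName s

def decode_patient_name_alt (name_cipher : Option String) : String :=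
  match name_cipher with
  | none => "Unknown"
  | some s =>
    if s = "" then "Unknown"
    else pvBBody s ((PySem.Chars.upper s.toList).filter PySem.Chars.isalpha)

-- ===== PRECONDITION & SPEC =====
def Spec_decode_patient_name (name_cipher : Option String) (out : String) : Prop := out = decode_patient_name_alt name_cipher
instance (name_cipher : Option String) (out : String) : Decidable (Spec_decode_patient_name name_cipher out) := by unfold Spec_decode_patient_name; infer_instance

-- ===== CLAIM (what is proved, stated in full; the proofs are below) =====
def Claim_equal_decode_patient_name : Prop := ∀ (name_cipher : Option String), Dom_decode_patient_name name_cipher → Spec_decode_patient_name name_cipher (decode_patient_name name_cipher)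

-- ===== LEMMAS AND PROOFS =====

-- one exact-split attempt at prefix length k (the common normal form of both exact-split loops)
def pvTry (name : List Char) (k : Nat) : Option String :=
  if PySem.Set.contains pvFIRSTl (name.take k) && PySem.Set.contains pvLASTl (name.drop k) then
    some (String.ofList (pvTitle (name.take k) ++ ' ' :: pvTitle (name.drop k)))
  else none

theorem pvLAST_not_nil : PySem.Set.contains pvLASTl [] = false := by decide

theorem pvTry_none_of_ge {name : List Char} {k : Nat} (h : name.length ≤ k) :
    pvTry name k = none := by
  unfold pvTry
  rw [List.drop_eq_nil_of_le h, pvLAST_not_nil]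
  simp

theorem pvBExact_succ (name : List Char) (m : Nat) (hm : 3 ≤ m) :
    pvBExact name (m + 1) = (pvTry name (m + 1)).orElse fun _ => pvBExact name m := by
  obtain ⟨k, rfl⟩ : ∃ k, m = k + 3 := ⟨m - 3, by omega⟩
  show pvBExact name (k + 4) = (pvTry name (k + 4)).orElse fun _ => pvBExact name (k + 3)
  simp only [pvBExact, pvTry]
  split <;> simp

theorem pvBExact_le3 (name : List Char) (m : Nat) (hm : m ≤ 3) : pvBExact name m = none := by
  interval_cases m <;> simp [pvBExact]

theorem pvBExact_up (name : List Char) (m : Nat) (hm : 3 ≤ m) (hnm : name.length ≤ m) :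
    ∀ l, m ≤ l → l ≤ 9 → pvBExact name l = pvBExact name m := by
  intro l hml
  induction l, hml using Nat.le_induction with
  | base => intro _; rfl
  | succ l hl ih =>
    intro h9
    rw [pvBExact_succ name l (by omega), pvTry_none_of_ge (by omega)]
    simp only [Option.orElse]
    exact ih (by omega)

theorem pvBExact_nine (name : List Char) :
    pvBExact name 9 =
      ((pvTry name 9).orElse fun _ => (pvTry name 8).orElse fun _ => (pvTry name 7).orElse fun _ =>
       (pvTry name 6).orElse fun _ => (pvTry name 5).orElse fun _ => (pvTry name 4).orElse fun _ => none) := by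
  rw [show (9 : Nat) = 8 + 1 from rfl, pvBExact_succ name 8 (by omega),
    show (8 : Nat) = 7 + 1 from rfl, pvBExact_succ name 7 (by omega),
    show (7 : Nat) = 6 + 1 from rfl, pvBExact_succ name 6 (by omega),
    show (6 : Nat) = 5 + 1 from rfl, pvBExact_succ name 5 (by omega),
    show (5 : Nat) = 4 + 1 from rfl, pvBExact_succ name 4 (by omega),
    show (4 : Nat) = 3 + 1 from rfl, pvBExact_succ name 3 (by omega),
    pvBExact_le3 name 3 (by omega)]

theorem pvBStart_eq_chain (name : List Char) :
    pvBExact name (min name.length 9) =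
      ((pvTry name 9).orElse fun _ => (pvTry name 8).orElse fun _ => (pvTry name 7).orElse fun _ =>
       (pvTry name 6).orElse fun _ => (pvTry name 5).orElse fun _ => (pvTry name 4).orElse fun _ => none) := by
  rcases le_total 9 name.length with h | h
  · rw [min_eq_right h]
    exact pvBExact_nine name
  · rw [min_eq_left h]
    rcases Nat.lt_or_ge name.length 4 with h3 | h3
    · rw [pvBExact_le3 name _ (by omega), ← pvBExact_nine name,
        pvBExact_up name 3 (by omega) (by omega) 9 (by omega) (by omega),
        pvBExact_le3 name 3 (by omega)]
    · rw [← pvBExact_nine name,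
        pvBExact_up name name.length (by omega) (le_refl _) 9 h (le_refl 9)]

-- A's loop, one name unfolded, with startswith turned into a take-equation
theorem pvALoop_cons (name fn : List Char) (rest : List (List Char)) :
    pvALoop name (fn :: rest) =
      if name.take fn.length = fn then
        (if PySem.Set.contains pvLASTl (name.drop fn.length) = true then
          some (String.ofList (pvTitle fn ++ ' ' :: pvTitle (name.drop fn.length)))
        else pvALoop name rest)
      else pvALoop name rest := by
  simp only [pvALoop, PySem.List.slice_from_natCast]
  by_cases h : PySem.Chars.startswith name fn = true
  · have hpre : fn <+: name := (PySem.Chars.startswith_iff name fn).mp h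
    have htake : name.take fn.length = fn := (List.prefix_iff_eq_take.mp hpre).symm
    rw [h, htake]
    simp
  · have hnp : ¬ fn <+: name := fun hp => h ((PySem.Chars.startswith_iff name fn).mpr hp)
    have htake : ¬ name.take fn.length = fn := fun he => hnp (he ▸ List.take_prefix _ _)
    simp only [Bool.not_eq_true] at h
    rw [h, if_neg htake]
    simp

-- A's loop over one block of equal-length names
theorem pvALoop_group (name : List Char) (k : Nat) (fns rest : List (List Char))
    (hlen : ∀ c ∈ fns, c.length = k) :
    pvALoop name (fns ++ rest) =
      if name.take k ∈ fns ∧ PySem.Set.contains pvLASTl (name.drop k) = true then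
        some (String.ofList (pvTitle (name.take k) ++ ' ' :: pvTitle (name.drop k)))
      else pvALoop name rest := by
  induction fns with
  | nil => simp
  | cons fn fns ih =>
    have hk : fn.length = k := hlen fn (by simp)
    rw [List.cons_append, pvALoop_cons, hk]
    by_cases h1 : name.take k = fn
    · rw [if_pos h1]
      by_cases h2 : PySem.Set.contains pvLASTl (name.drop k) = true
      · rw [if_pos h2, if_pos ⟨by simp [h1], h2⟩, h1]
      · rw [if_neg h2, ih (fun c hc => hlen c (by simp [hc])),
          if_neg (fun h => h2 h.2), if_neg (fun h => h2 h.2)]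
    · rw [if_neg h1, ih (fun c hc => hlen c (by simp [hc]))]
      have hiff : (name.take k ∈ fn :: fns ∧ PySem.Set.contains pvLASTl (name.drop k) = true) ↔
          (name.take k ∈ fns ∧ PySem.Set.contains pvLASTl (name.drop k) = true) := by
        constructor
        · rintro ⟨hm, hl⟩
          rcases List.mem_cons.mp hm with h | h
          · exact absurd h h1
          · exact ⟨h, hl⟩
        · rintro ⟨hm, hl⟩
          exact ⟨List.mem_cons.mpr (Or.inr hm), hl⟩
      by_cases hc : name.take k ∈ fns ∧ PySem.Set.contains pvLASTl (name.drop k) = true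
      · rw [if_pos (hiff.mpr hc), if_pos hc]
      · rw [if_neg (fun h => hc (hiff.mp h)), if_neg hc]

-- a block of exactly the length-k first names is one pvTry
theorem pvGroup_eq_try (name : List Char) (k : Nat) (fns rest : List (List Char))
    (hsub : ∀ c ∈ fns, c ∈ pvFIRSTl) (hmem : ∀ c ∈ pvFIRSTl, c.length = k → c ∈ fns)
    (hlen : ∀ c ∈ fns, c.length = k) :
    pvALoop name (fns ++ rest) = (pvTry name k).orElse fun _ => pvALoop name rest := by
  rw [pvALoop_group name k fns rest hlen]
  unfold pvTry
  by_cases hL : PySem.Set.contains pvLASTl (name.drop k) = true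
  · have hkn : k < name.length := by
      by_contra h
      rw [List.drop_eq_nil_of_le (by omega), pvLAST_not_nil] at hL
      exact Bool.false_ne_true hL
    have hlt : (name.take k).length = k := by rw [List.length_take]; omega
    by_cases hF : name.take k ∈ fns
    · rw [if_pos ⟨hF, hL⟩]
      have hc : PySem.Set.contains pvFIRSTl (name.take k) = true :=
        (PySem.Set.contains_iff _ _).mpr (hsub _ hF)
      rw [hc, hL]
      simp
    · rw [if_neg (fun h => hF h.1)]
      have hc : PySem.Set.contains pvFIRSTl (name.take k) = false := by
        rw [← Bool.not_eq_true, PySem.Set.contains_iff]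
        intro hm
        exact hF (hmem _ hm hlt)
      rw [hc]
      simp
  · rw [if_neg (fun h => hL h.2)]
    have hLf : PySem.Set.contains pvLASTl (name.drop k) = false := by
      rw [← Bool.not_eq_true]; exact hL
    rw [hLf]
    simp

theorem pvSortedFirst_eq : pvSortedFirst =
    ["ELIZABETH".toList] ++ (["PATRICIA".toList] ++
    ((["MICHAEL".toList, "WILLIAM".toList, "RICHARD".toList, "BARBARA".toList, "CHARLES".toList, "JESSICA".toList]) ++
    ((["ROBERT".toList, "JOSEPH".toList, "THOMAS".toList]) ++
    ((["MARIA".toList, "DAVID".toList, "SARAH".toList, "EMILY".toList, "JAMES".toList, "LINDA".toList, "SUSAN".toList]) ++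
    ((["JOHN".toList, "JANE".toList]) ++ ([] : List (List Char))))))) := by decide

theorem pvALoop_eq_pvBExact (name : List Char) :
    pvALoop name pvSortedFirst = pvBExact name (min name.length 9) := by
  rw [pvBStart_eq_chain, pvSortedFirst_eq,
      pvGroup_eq_try name 9 ["ELIZABETH".toList] _ (by decide) (by decide) (by decide),
      pvGroup_eq_try name 8 ["PATRICIA".toList] _ (by decide) (by decide) (by decide),
      pvGroup_eq_try name 7 ["MICHAEL".toList, "WILLIAM".toList, "RICHARD".toList, "BARBARA".toList, "CHARLES".toList, "JESSICA".toList] _ (by decide) (by decide) (by decide),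
      pvGroup_eq_try name 6 ["ROBERT".toList, "JOSEPH".toList, "THOMAS".toList] _ (by decide) (by decide) (by decide),
      pvGroup_eq_try name 5 ["MARIA".toList, "DAVID".toList, "SARAH".toList, "EMILY".toList, "JAMES".toList, "LINDA".toList, "SUSAN".toList] _ (by decide) (by decide) (by decide),
      pvGroup_eq_try name 4 ["JOHN".toList, "JANE".toList] _ (by decide) (by decide) (by decide)]
  rfl

-- ----- fallback loop -----

theorem pvFoldl_fix {α β : Type} (f : β → α → β) (s : β) (l : List α)
    (h : ∀ x ∈ l, f s x = s) : l.foldl f s = s := by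
  induction l with
  | nil => rfl
  | cons x xs ih =>
    rw [List.foldl_cons, h x (by simp)]
    exact ih (fun y hy => h y (by simp [hy]))

theorem pvStrIsalpha_of (cs : List Char) (h : ∀ c ∈ cs, PySem.Chars.isalpha c = true)
    (hne : cs ≠ []) : PySem.Chars.strIsalpha cs = true := by
  unfold PySem.Chars.strIsalpha
  simp [List.isEmpty_eq_false_iff.mpr hne, List.all_eq_true.mpr h]

-- pvAStep at a valid interior split index, for an all-alphabetic nonempty name
theorem pvAStep_at (name : List Char) (hA : ∀ c ∈ name, PySem.Chars.isalpha c = true)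
    (j : Nat) (h2 : 2 ≤ j) (hj : j + 2 ≤ name.length)
    (st : Option (List Char × List Char) × Option (Int × Int)) :
    pvAStep name st (j : Int) =
      (match st.2 with
       | none => (some (name.take j, name.drop j),
           some (|2 * (j : Int) - name.length|, -(min (j : Int) ((name.length : Int) - j))))
       | some best =>
         if |2 * (j : Int) - name.length| < best.1 ∨
            (|2 * (j : Int) - name.length| = best.1 ∧ -(min (j : Int) ((name.length : Int) - j)) < best.2) then
           (some (name.take j, name.drop j),
            some (|2 * (j : Int) - name.length|, -(min (j : Int) ((name.length : Int) - j))))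
         else st) := by
  have htl : (name.take j).length = j := by rw [List.length_take]; omega
  have hdl : (name.drop j).length = name.length - j := by rw [List.length_drop]
  have ht : PySem.Chars.strIsalpha (name.take j) = true :=
    pvStrIsalpha_of _ (fun c hc => hA c (List.mem_of_mem_take hc))
      (by intro h; rw [h] at htl; simp at htl; omega)
  have hd : PySem.Chars.strIsalpha (name.drop j) = true :=
    pvStrIsalpha_of _ (fun c hc => hA c (List.mem_of_mem_drop hc))
      (by intro h; rw [h] at hdl; simp at hdl; omega)
  simp only [pvAStep, PySem.List.slice_to_natCast, PySem.List.slice_from_natCast, ht, hd,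
    Bool.and_self, Bool.not_true, Bool.false_eq_true, if_false, htl, hdl]
  rw [if_neg (by omega),
    show ((j : Int) - ((name.length - j : Nat) : Int)) = 2 * (j : Int) - name.length by omega,
    show (min (j : Int) (((name.length - j : Nat)) : Int)) = min (j : Int) ((name.length : Int) - j) by
      congr 1; omega]

-- the same step when the split index is at most the middle: the score in closed form
theorem pvAStep_at_low (name : List Char) (hA : ∀ c ∈ name, PySem.Chars.isalpha c = true)
    (j : Nat) (h2 : 2 ≤ j) (hj : j + 2 ≤ name.length) (hlow : 2 * j ≤ name.length)
    (st : Option (List Char × List Char) × Option (Int × Int)) :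
    pvAStep name st (j : Int) =
      (match st.2 with
       | none => (some (name.take j, name.drop j),
           some ((name.length : Int) - 2 * j, -(j : Int)))
       | some best =>
         if (name.length : Int) - 2 * j < best.1 ∨
            ((name.length : Int) - 2 * j = best.1 ∧ -(j : Int) < best.2) then
           (some (name.take j, name.drop j),
            some ((name.length : Int) - 2 * j, -(j : Int)))
         else st) := by
  rw [pvAStep_at name hA j h2 hj st,
    show |2 * (j : Int) - name.length| = (name.length : Int) - 2 * j by
      rw [abs_of_nonpos (by omega)]; ring,
    show min (j : Int) ((name.length : Int) - j) = (j : Int) from min_eq_left (by omega)]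

theorem pvPhase1 (name : List Char) (hAlpha : ∀ c ∈ name, PySem.Chars.isalpha c = true)
    (_hn : 4 ≤ name.length) :
    ∀ j : Nat, 2 ≤ j → 2 * j ≤ name.length →
      (PySem.List.pyRange 2 ((j : Int) + 1) 1).foldl (pvAStep name) (none, none) =
        (some (name.take j, name.drop j),
         some ((name.length : Int) - 2 * j, -(j : Int))) := by
  intro j h2
  induction j, h2 using Nat.le_induction with
  | base =>
    intro hlow
    rw [show ((2 : Nat) : Int) + 1 = 2 + 1 by norm_num, PySem.List.pyRange_one_singleton 2,
      List.foldl_cons, List.foldl_nil,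
      show (2 : Int) = ((2 : Nat) : Int) by norm_num,
      pvAStep_at_low name hAlpha 2 (by omega) (by omega) (by omega)]
    norm_num
  | succ k hk ih =>
    intro hlow
    rw [show ((k + 1 : Nat) : Int) + 1 = ((k : Int) + 1) + 1 by push_cast; ring,
      PySem.List.pyRange_one_succ_right (by omega),
      List.foldl_append, ih (by omega), List.foldl_cons, List.foldl_nil,
      show ((k : Int) + 1) = ((k + 1 : Nat) : Int) by push_cast; ring,
      pvAStep_at_low name hAlpha (k + 1) (by omega) (by omega) (by omega)]
    simp only
    rw [if_pos (Or.inl (by push_cast; omega))]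

theorem pvPhase2 (name : List Char) (hAlpha : ∀ c ∈ name, PySem.Chars.isalpha c = true)
    (_hn : 4 ≤ name.length) :
    ∀ i ∈ PySem.List.pyRange ((name.length / 2 : Nat) + 1) ((name.length : Int) - 1) 1,
      pvAStep name
        (some (name.take (name.length / 2), name.drop (name.length / 2)),
         some ((name.length : Int) - 2 * (name.length / 2 : Nat), -((name.length / 2 : Nat) : Int))) i =
        (some (name.take (name.length / 2), name.drop (name.length / 2)),
         some ((name.length : Int) - 2 * (name.length / 2 : Nat), -((name.length / 2 : Nat) : Int))) := by
  intro i hi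
  rw [PySem.List.mem_pyRange_one] at hi
  obtain ⟨hlo, hhi⟩ := hi
  have h0i : 0 ≤ i := le_trans (Int.natCast_nonneg _) hlo
  lift i to Nat using h0i with j
  have hj1 : name.length / 2 + 1 ≤ j := by exact_mod_cast hlo
  have hj2 : j + 2 ≤ name.length := by omega
  have habs : |2 * (j : Int) - name.length| = 2 * (j : Int) - name.length :=
    abs_of_nonneg (by omega)
  have hmin : min (j : Int) ((name.length : Int) - j) = (name.length : Int) - j :=
    min_eq_right (by omega)
  rw [pvAStep_at name hAlpha j (by omega) hj2]
  simp only [habs, hmin]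
  rw [if_neg (by omega)]

theorem pvAFold_big (name : List Char) (hAlpha : ∀ c ∈ name, PySem.Chars.isalpha c = true)
    (hn : 4 ≤ name.length) :
    (pvAFold name).1 = some (name.take (name.length / 2), name.drop (name.length / 2)) := by
  have hm2 : 2 ≤ name.length / 2 := by omega
  have hsplit : PySem.List.pyRange 2 ((name.length : Int) - 1) 1 =
      PySem.List.pyRange 2 ((name.length / 2 : Nat) + 1) 1 ++
      PySem.List.pyRange ((name.length / 2 : Nat) + 1) ((name.length : Int) - 1) 1 := by
    apply PySem.List.pyRange_one_append
    · push_cast; omega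
    · push_cast; omega
  unfold pvAFold
  rw [hsplit, List.foldl_append,
    pvPhase1 name hAlpha hn (name.length / 2) hm2 (by omega),
    pvFoldl_fix _ _ _ (pvPhase2 name hAlpha hn)]

theorem pvAFold_small (name : List Char) (hn : name.length ≤ 3) :
    (pvAFold name).1 = none := by
  unfold pvAFold
  rw [PySem.List.pyRange_one_eq_nil (by omega)]
  rfl

theorem pvBody_eq (s : String) (name : List Char)
    (hAlpha : ∀ c ∈ name, PySem.Chars.isalpha c = true) :
    pvABody s name = pvBBody s name := by
  unfold pvABody pvBBody
  by_cases hnil : name = []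
  · rw [if_pos hnil, if_pos hnil]
  · rw [if_neg hnil, if_neg hnil, pvALoop_eq_pvBExact]
    cases hB : pvBExact name (min name.length 9) with
    | some r => rfl
    | none =>
      simp only
      rcases Nat.lt_or_ge name.length 4 with h4 | h4
      · rw [pvAFold_small name (by omega), if_neg (by omega)]
      · rw [pvAFold_big name hAlpha h4, if_pos h4]

-- ===== VERDICT (by name: the statement is the Claim_ definition above) =====
theorem decode_patient_name_spec : Claim_equal_decode_patient_name := by
  intro name_cipher _
  unfold Spec_decode_patient_name
  cases name_cipher with
  | none => rfl
  | some s =>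
    simp only [decode_patient_name, decode_patient_name_alt]
    by_cases hs : s = ""
    · rw [if_pos hs, if_pos hs]
    · rw [if_neg hs, if_neg hs]
      exact pvBody_eq s _ (fun c hc => (List.mem_filter.mp hc).2)
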